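/- GENERATED by farm/mkstatement.py from design/units.split.tsv — do not edit.
   THE SPLIT of the proof unit `vorbis_decode_packet_rest.2` into `vorbis_decode_packet_rest.2a`, `vorbis_decode_packet_rest.2b`, `vorbis_decode_packet_rest.2c`, `vorbis_decode_packet_rest.2d`: the children's statements give the parent's
   UNCHANGED statement (so nothing above the parent — callers, compositions — is touched by the split). -/
import Vorbis.Spec.PacketRest2
import Vorbis.Spec.Units.vorbis_decode_packet_rest_2
import Vorbis.Spec.Units.vorbis_decode_packet_rest_2a
import Vorbis.Spec.Units.vorbis_decode_packet_rest_2b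
import Vorbis.Spec.Units.vorbis_decode_packet_rest_2c
import Vorbis.Spec.Units.vorbis_decode_packet_rest_2d
namespace Vorbis.Spec.Splits
open X86 X86.User Asan

/-- The children of the split unit `vorbis_decode_packet_rest.2` prove it, by `Vorbis.Spec.vorbis_decode_packet_rest.Seg2.of_parts`. -/
theorem vorbis_decode_packet_rest_2
    (h_vorbis_decode_packet_rest_2a : Vorbis.Spec.vorbis_decode_packet_rest_2a.Statement)
    (h_vorbis_decode_packet_rest_2b : Vorbis.Spec.vorbis_decode_packet_rest_2b.Statement)
    (h_vorbis_decode_packet_rest_2c : Vorbis.Spec.vorbis_decode_packet_rest_2c.Statement)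
    (h_vorbis_decode_packet_rest_2d : Vorbis.Spec.vorbis_decode_packet_rest_2d.Statement) :
    Vorbis.Spec.vorbis_decode_packet_rest_2.Statement := by
  intro Lay _hLay μ _hμ u₀ _hcode _h_asan_load4_noabort _h_asan_load8_noabort _h_asan_load1_noabort _h_asan_store4_noabort _h_asan_load2_noabort _h_get_bits _h_ilog _h_asan_store2_noabort
  apply Vorbis.Spec.vorbis_decode_packet_rest.Seg2.of_parts
  · exact h_vorbis_decode_packet_rest_2a Lay _hLay μ _hμ u₀ _hcode _h_asan_load4_noabort _h_asan_load8_noabort _h_asan_load1_noabort _h_asan_store4_noabort _h_asan_load2_noabort _h_get_bits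
  · exact h_vorbis_decode_packet_rest_2b Lay _hLay μ _hμ u₀ _hcode _h_asan_load4_noabort _h_asan_load8_noabort _h_asan_load1_noabort _h_get_bits _h_ilog
  · exact h_vorbis_decode_packet_rest_2c Lay _hLay μ _hμ u₀ _hcode _h_get_bits _h_ilog _h_asan_store2_noabort
  · exact h_vorbis_decode_packet_rest_2d Lay _hLay μ _hμ u₀ _hcode _h_asan_store2_noabort

end Vorbis.Spec.Splits
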